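-- pv_equiv track=rewrite | github.com/T0ren4ik/first_semester_py | Матрицы (10 раздел)/10.37.py | A_B
-- ===== SOURCE A (Python) =====
-- def A_B(A, B):
--     res = []
--     for s in range(len(A[0])):
--         p_res = 0
--         for i in range(len(A[0])):
--             for j in range(len(B)):
--                 p_res += A[s][i] * B[j][s]
--         res += [p_res]
--
--     return res
-- ===== SOURCE B (Python) =====
-- def A_B(A, B):
--     n = len(A[0])
--     col = [sum(row[s] for row in B) for s in range(n)]
--     return [sum(A[s][:n]) * col[s] for s in range(n)]
-- ===== Notes on version B (the rewrite author's own statement) =====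
-- stated objective: faster
-- what changed: The triple loop summing A[s][i]*B[j][s] is factored into (row-sum of A[s][:n]) * (column-sum s of B), precomputing all column sums in one pass.
-- outside the precondition, e.g. on A_B([[1, 2]], []): A returns [0, 0], B raises IndexError
import Mathlib
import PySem

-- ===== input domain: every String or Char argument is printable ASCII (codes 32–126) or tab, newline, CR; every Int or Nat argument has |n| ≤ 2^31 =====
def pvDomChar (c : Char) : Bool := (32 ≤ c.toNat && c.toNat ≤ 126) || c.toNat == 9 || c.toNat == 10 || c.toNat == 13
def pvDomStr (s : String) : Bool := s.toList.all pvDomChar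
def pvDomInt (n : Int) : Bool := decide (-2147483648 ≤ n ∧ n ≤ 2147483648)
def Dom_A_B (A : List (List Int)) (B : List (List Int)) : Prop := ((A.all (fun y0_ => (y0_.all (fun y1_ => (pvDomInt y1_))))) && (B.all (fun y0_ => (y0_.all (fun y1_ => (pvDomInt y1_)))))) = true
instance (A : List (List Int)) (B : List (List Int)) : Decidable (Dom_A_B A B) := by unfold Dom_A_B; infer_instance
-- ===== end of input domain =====

-- B replaces A's cubic triple loop by the factorisation Σ_i Σ_j A[s][i]*B[j][s] =
-- (row-sum of A[s]) * (column-sum s of B), computed in two passes (faster, asymptotic).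

-- ===== PORT A =====
def A_B (A : List (List Int)) (B : List (List Int)) : List Int :=
  -- res = []; for s in range(len(A[0])): p_res = 0; for i …: for j …: p_res += A[s][i]*B[j][s]; res += [p_res]
  let n : Int := ((A.headD []).length : Int)   -- len(A[0]); Pre_ requires A ≠ []
  (PySem.List.pyRange 0 n 1).foldl (fun res s =>
    res ++ [ (PySem.List.pyRange 0 n 1).foldl (fun p i =>
        (PySem.List.pyRange 0 ((B.length : Int)) 1).foldl (fun p j =>
          p + (PySem.List.pyGetD (PySem.List.pyGetD A s []) i 0)
              * (PySem.List.pyGetD (PySem.List.pyGetD B j []) s 0)) p) 0 ]) []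

-- ===== PORT B =====
def A_B_alt (A : List (List Int)) (B : List (List Int)) : List Int :=
  let n : Int := ((A.headD []).length : Int)   -- len(A[0])
  -- col = [sum(row[s] for row in B) for s in range(n)]
  let col : List Int := (PySem.List.pyRange 0 n 1).map (fun s =>
    (B.map (fun row => PySem.List.pyGetD row s 0)).sum)
  -- [sum(A[s][:n]) * col[s] for s in range(n)]
  (PySem.List.pyRange 0 n 1).map (fun s =>
    (PySem.List.slice (PySem.List.pyGetD A s []) none (some n)).sum
      * PySem.List.pyGetD col s 0)

-- ===== PRECONDITION & SPEC =====
-- Pre_ excludes inputs where the Python raises IndexError (A = [], or — with B nonempty — a matrix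
-- too ragged for the indexing A[s][i], B[j][s]); it also excludes B = [] with A shorter/more ragged
-- than len(A[0]) requires, where A returns a list of zeros without ever touching A's rows while the
-- natural B raises IndexError there.
def Pre_A_B (A : List (List Int)) (B : List (List Int)) : Prop :=
  A ≠ [] ∧
  (A.headD []).length ≤ A.length ∧
  (∀ s < (A.headD []).length, (A.headD []).length ≤ (A.getD s []).length) ∧
  (∀ row ∈ B, (A.headD []).length ≤ row.length)
instance (A : List (List Int)) (B : List (List Int)) : Decidable (Pre_A_B A B) := by
  unfold Pre_A_B; infer_instance

def pvWitness_A_B : List (List Int) × List (List Int) :=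
  ([[1, 2], [3, 4]], [[5, 6], [7, 8]])

def Spec_A_B (A : List (List Int)) (B : List (List Int)) (out : List Int) : Prop := out = A_B_alt A B
instance (A : List (List Int)) (B : List (List Int)) (out : List Int) : Decidable (Spec_A_B A B out) := by unfold Spec_A_B; infer_instance

-- ===== CLAIM (what is proved, stated in full; the proofs are below) =====
def Claim_equal_A_B : Prop := ∀ (A : List (List Int)) (B : List (List Int)), Dom_A_B A B → Pre_A_B A B → Spec_A_B A B (A_B A B)

-- ===== LEMMAS AND PROOFS =====

-- indexing the first k ≤ |xs| positions collects the prefix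
lemma map_pyGetD_range_take (xs : List Int) (k : Nat) (d : Int) (hk : k ≤ xs.length) :
    (PySem.List.pyRange 0 (k : Int) 1).map (fun i => PySem.List.pyGetD xs i d) = xs.take k := by
  rw [PySem.List.pyRange_one, List.map_map]
  apply List.ext_getElem
  · simpa using hk
  · intro i h1 h2
    simp only [List.getElem_map, List.getElem_range, Function.comp_apply]
    rw [PySem.List.pyGetD_of_nonneg _ _ (by positivity)]
    simp only [List.length_map, List.length_range] at h1
    rw [List.getElem_take]
    have : ((0 : Int) + (i : Int)).toNat = i := by omega
    rw [this, List.getD_eq_getElem _ _ (by omega)]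

-- the j-loop of A sums column s of B
lemma inner_col (Bm : List (List Int)) (s p : Int) (a : Int) :
    (PySem.List.pyRange 0 ((Bm.length : Int)) 1).foldl
        (fun p j => p + a * (PySem.List.pyGetD (PySem.List.pyGetD Bm j []) s 0)) p
      = p + a * (Bm.map (fun row => PySem.List.pyGetD row s 0)).sum := by
  rw [PySem.List.foldl_add]
  have h : (PySem.List.pyRange 0 ((Bm.length : Int)) 1).map
      (fun j => a * PySem.List.pyGetD (PySem.List.pyGetD Bm j []) s 0)
      = ((PySem.List.pyRange 0 ((Bm.length : Int)) 1).map
          (fun j => PySem.List.pyGetD Bm j [])).map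
          (fun row => a * PySem.List.pyGetD row s 0) := by
    rw [List.map_map]; rfl
  rw [h]
  have h2 : (PySem.List.pyRange 0 ((Bm.length : Int)) 1).map
      (fun j => PySem.List.pyGetD Bm j []) = Bm := by
    simpa [PySem.List.len] using PySem.List.map_pyGetD_pyRange_zero Bm ([] : List Int)
  rw [h2, List.sum_map_mul_left]

-- ===== VERDICT (by name: the statement is the Claim_ definition above) =====
theorem A_B_spec : Claim_equal_A_B := by
  intro A B _ hPre
  obtain ⟨hA, hlen, hrows, hB⟩ := hPre
  unfold Spec_A_B A_B A_B_alt
  rw [PySem.List.foldl_append_singleton_eq_map, List.nil_append]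
  apply List.map_congr_left
  intro s hs
  rw [PySem.List.mem_pyRange_one] at hs
  set n : Nat := (A.headD []).length with hn
  -- the i/j double loop = row-sum * column-sum
  have hcol : ∀ p a, (PySem.List.pyRange 0 ((B.length : Int)) 1).foldl
        (fun p j => p + a * (PySem.List.pyGetD (PySem.List.pyGetD B j []) s 0)) p
      = p + a * (B.map (fun row => PySem.List.pyGetD row s 0)).sum := fun p a => inner_col B s p a
  have hloop : (PySem.List.pyRange 0 (n : Int) 1).foldl (fun p i =>
        (PySem.List.pyRange 0 ((B.length : Int)) 1).foldl (fun p j =>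
          p + (PySem.List.pyGetD (PySem.List.pyGetD A s []) i 0)
              * (PySem.List.pyGetD (PySem.List.pyGetD B j []) s 0)) p) 0
      = ((PySem.List.pyRange 0 (n : Int) 1).map
            (fun i => PySem.List.pyGetD (PySem.List.pyGetD A s []) i 0)).sum
          * (B.map (fun row => PySem.List.pyGetD row s 0)).sum := by
    have : ∀ l : List Int, ∀ p : Int, l.foldl (fun p i =>
        (PySem.List.pyRange 0 ((B.length : Int)) 1).foldl (fun p j =>
          p + (PySem.List.pyGetD (PySem.List.pyGetD A s []) i 0)
              * (PySem.List.pyGetD (PySem.List.pyGetD B j []) s 0)) p) p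
        = p + (l.map (fun i => PySem.List.pyGetD (PySem.List.pyGetD A s []) i 0)).sum
            * (B.map (fun row => PySem.List.pyGetD row s 0)).sum := by
      intro l
      induction l with
      | nil => intro p; simp
      | cons x xs ih =>
        intro p
        simp only [List.foldl_cons, List.map_cons, List.sum_cons]
        rw [ih, hcol]
        ring
    simpa using this (PySem.List.pyRange 0 (n : Int) 1) 0
  rw [hloop]
  congr 1
  · -- row sum: Σ_{i<n} A[s][i] = sum(A[s][:n])
    have hs' : PySem.List.pyGetD A s [] = A.getD s.toNat [] :=
      PySem.List.pyGetD_of_nonneg _ _ hs.1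
    have hslen : n ≤ (A.getD s.toNat []).length := by
      apply hrows
      omega
    rw [hs', map_pyGetD_range_take _ n 0 hslen, PySem.List.slice_to _ (by positivity)]
    simp
  · -- col[s]
    rw [PySem.List.pyGetD_map_pyRange_of_nonneg _ _ _ _ hs.1 hs.2]
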